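-- pv_equiv track=rewrite | github.com/lo1ol/ProEncryptor | ProEncryptor/source/decryptor.py | sequential_permutation_for_word
-- ===== SOURCE A (Python) =====
-- def sequential_permutation_for_word(word):
-- 	result = []
-- 	for i in range(len(word)):
-- 		if i % 2 == 0:
-- 			result.append(word[len(word)//2+i//2])
-- 		else:
-- 			result.append((word[i//2]))
-- 	return ''.join(result)
-- ===== SOURCE B (Python) =====
-- def sequential_permutation_for_word(word):
--     n = len(word)
--     first = word[:n // 2]
--     second = word[n // 2:]
--     result = []
--     for s, f in zip(second, first):
--         result.append(s)
--         result.append(f)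
--     if len(second) > len(first):
--         result.append(second[-1])
--     return ''.join(result)
-- ===== Notes on version B (the rewrite author's own statement) =====
-- stated objective: simpler
-- what changed: Replaces A's parity-branching index loop over range(len(word)) with a pairwise interleave over zip of the two precomputed halves plus an explicit odd-length leftover character.
import Mathlib
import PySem

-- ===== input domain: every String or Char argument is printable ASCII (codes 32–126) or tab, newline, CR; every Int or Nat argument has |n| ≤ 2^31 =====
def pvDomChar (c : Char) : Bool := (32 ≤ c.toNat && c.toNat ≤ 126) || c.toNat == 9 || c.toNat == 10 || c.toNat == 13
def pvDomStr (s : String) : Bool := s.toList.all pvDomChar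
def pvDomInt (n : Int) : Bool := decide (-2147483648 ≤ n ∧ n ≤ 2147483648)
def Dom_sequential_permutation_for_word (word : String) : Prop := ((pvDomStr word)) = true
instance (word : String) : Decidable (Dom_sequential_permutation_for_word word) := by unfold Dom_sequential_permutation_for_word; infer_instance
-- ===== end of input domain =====

-- B interleaves zip of the two precomputed halves (plus the odd leftover) instead of A's
-- parity-branching index loop; objective: simpler decomposition, same O(n) cost.

-- ===== PORT A =====
-- literal port of A: for i in range(len(word)): parity branch, indexed appends, ''.join
def sequential_permutation_for_word (word : String) : String :=
  let n : Int := PySem.Str.len word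
  let result : List Char :=
    (PySem.List.pyRange 0 n 1).foldl (fun acc i =>
      if PySem.Int.mod i 2 == 0 then
        -- word[len(word)//2 + i//2]; index always in range, so the option is a singleton
        acc ++ (PySem.Str.pyGet? word (PySem.Int.floordiv n 2 + PySem.Int.floordiv i 2)).toList
      else
        acc ++ (PySem.Str.pyGet? word (PySem.Int.floordiv i 2)).toList) []
  String.ofList result

-- ===== PORT B =====
-- literal port of Source B: halves, interleave over zip, odd-length leftover, join
def sequential_permutation_for_word_alt (word : String) : String :=
  let cs := word.toList
  let n := cs.length
  let first := cs.take (n / 2)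
  let second := cs.drop (n / 2)
  let body := (second.zip first).foldl (fun acc p => acc ++ [p.1, p.2]) ([] : List Char)
  let result := if first.length < second.length then body ++ second.getLast?.toList else body
  String.ofList result

-- ===== PRECONDITION & SPEC =====
def Spec_sequential_permutation_for_word (word : String) (out : String) : Prop := out = sequential_permutation_for_word_alt word
instance (word : String) (out : String) : Decidable (Spec_sequential_permutation_for_word word out) := by unfold Spec_sequential_permutation_for_word; infer_instance

-- ===== CLAIM (what is proved, stated in full; the proofs are below) =====
def Claim_equal_sequential_permutation_for_word : Prop := ∀ (word : String), Dom_sequential_permutation_for_word word → Spec_sequential_permutation_for_word word (sequential_permutation_for_word word)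

-- ===== LEMMAS AND PROOFS =====

-- canonical interleave: second-half char, first-half char, …, with any leftover of s at the end
def pvMix : List Char → List Char → List Char
  | a :: as, b :: bs => a :: b :: pvMix as bs
  | s, [] => s
  | [], _ => []

-- B's loop body computes pvMix
theorem pv_zip_mix (f : List Char) : ∀ (s : List Char), f.length ≤ s.length → s.length ≤ f.length + 1 →
    (s.zip f).flatMap (fun p => [p.1, p.2]) ++
      (if f.length < s.length then s.getLast?.toList else []) = pvMix s f := by
  induction f with
  | nil =>
    intro s h1 h2
    match s with
    | [] => simp [pvMix]
    | [a] => simp [pvMix]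
    | a :: b :: t => simp at h2
  | cons b bs ih =>
    intro s h1 h2
    match s with
    | [] => simp at h1
    | a :: as =>
      simp only [List.zip_cons_cons, List.flatMap_cons, pvMix]
      simp only [List.length_cons] at h1 h2 ⊢
      by_cases h : bs.length < as.length
      · cases as with
        | nil => simp at h
        | cons c as' =>
          rw [if_pos (by omega : bs.length + 1 < (c :: as').length + 1), List.getLast?_cons_cons]
          have hih := ih (c :: as') (by simp at h ⊢; omega) (by simp at h2 ⊢; omega)
          rw [if_pos (by simp at h ⊢; omega : bs.length < (c :: as').length)] at hih
          rw [← hih]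
          simp
      · rw [if_neg (by omega : ¬ bs.length + 1 < as.length + 1)]
        have hih := ih as (by omega) (by omega)
        rw [if_neg h] at hih
        simp at hih ⊢
        exact hih

-- flatMap of pointwise singletons is a map
theorem pv_flatMap_singleton {α β : Type} (l : List α) (g : α → List β) (e : α → β)
    (h : ∀ x ∈ l, g x = [e x]) : l.flatMap g = l.map e := by
  induction l with
  | nil => simp
  | cons a t ih =>
    simp only [List.flatMap_cons, List.map_cons, h a (by simp)]
    rw [ih (fun x hx => h x (by simp [hx]))]
    rfl

-- A's parity loop over range (|s| + |f|) computes pvMix of the two halves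
theorem pv_range_mix (f : List Char) : ∀ (s : List Char), f.length ≤ s.length → s.length ≤ f.length + 1 →
    (List.range (s.length + f.length)).map
      (fun k => if k % 2 = 0 then s.getD (k / 2) 'A' else f.getD (k / 2) 'A') = pvMix s f := by
  induction f with
  | nil =>
    intro s h1 h2
    match s with
    | [] => simp [pvMix]
    | [a] => simp [pvMix, List.range_succ]
    | a :: b :: t => simp at h2
  | cons b bs ih =>
    intro s h1 h2
    match s with
    | [] => simp at h1
    | a :: as =>
      simp only [List.length_cons] at h1 h2 ⊢
      have hn : as.length + 1 + (bs.length + 1) = (as.length + bs.length) + 1 + 1 := by omega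
      rw [hn, List.range_succ_eq_map, List.range_succ_eq_map]
      simp only [List.map_cons, List.map_map]
      have e0 : (if 0 % 2 = 0 then (a :: as).getD (0 / 2) 'A' else (b :: bs).getD (0 / 2) 'A') = a := by
        simp
      have e1 : (if (0 + 1) % 2 = 0 then (a :: as).getD ((0 + 1) / 2) 'A' else (b :: bs).getD ((0 + 1) / 2) 'A') = b := by
        simp
      have etail : (List.range (as.length + bs.length)).map
          ((fun k => if k % 2 = 0 then (a :: as).getD (k / 2) 'A' else (b :: bs).getD (k / 2) 'A') ∘
            ((· + 1) ∘ (· + 1))) =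
          (List.range (as.length + bs.length)).map
          (fun k => if k % 2 = 0 then as.getD (k / 2) 'A' else bs.getD (k / 2) 'A') := by
        apply List.map_congr_left
        intro k _
        have hm : (k + 1 + 1) % 2 = k % 2 := by omega
        have hd : (k + 1 + 1) / 2 = k / 2 + 1 := by omega
        simp [Function.comp, hm, hd]
      
      rw [etail, ih as (by omega) (by omega)]
      simp [pvMix]

-- fold with a branch that appends either list is a flatMap of the branch
theorem pv_foldl_ite_append {α β : Type} (p : α → Bool) (u v : α → List β) (l : List α)
    (acc : List β) :
    l.foldl (fun acc x => if p x then acc ++ u x else acc ++ v x) acc =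
      acc ++ l.flatMap (fun x => if p x then u x else v x) := by
  induction l generalizing acc with
  | nil => simp
  | cons x xs ih =>
    simp only [List.foldl_cons, List.flatMap_cons, ih]
    by_cases h : p x = true <;> simp [h, List.append_assoc]

-- ===== VERDICT (by name: the statement is the Claim_ definition above) =====
theorem sequential_permutation_for_word_spec : Claim_equal_sequential_permutation_for_word := by
  intro word _
  unfold Spec_sequential_permutation_for_word
  simp only [sequential_permutation_for_word, sequential_permutation_for_word_alt]
  rw [PySem.Str.len_eq word]
  set cs := word.toList with hcs
  set n := cs.length with hn
  set f := cs.take (n / 2) with hf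
  set s := cs.drop (n / 2) with hs
  have hfl : f.length = n / 2 := by rw [hf]; simp [hn]; omega
  have hsl : s.length = n - n / 2 := by rw [hs]; simp [hn]
  -- A side: fold → flatMap over range n → map → pvMix
  rw [pv_foldl_ite_append, PySem.List.pyRange_one]
  simp only [Int.sub_zero, Int.toNat_natCast, zero_add, List.nil_append]
  rw [List.flatMap_map]
  rw [pv_flatMap_singleton (List.range n) _
      (fun k => if k % 2 = 0 then s.getD (k / 2) 'A' else f.getD (k / 2) 'A')]
  · -- B side: fold → flatMap → pvMix, then both sides are pvMix s f
    rw [PySem.List.foldl_append_eq_flatMap, List.nil_append]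
    rw [show n = s.length + f.length by omega, pv_range_mix f s (by omega) (by omega)]
    have hB : (if f.length < s.length then
          (s.zip f).flatMap (fun p => [p.1, p.2]) ++ s.getLast?.toList
        else (s.zip f).flatMap (fun p => [p.1, p.2])) = pvMix s f := by
      rw [← pv_zip_mix f s (by omega) (by omega)]
      by_cases h : f.length < s.length <;> simp [h]
    rw [hB]
  · -- each iteration appends exactly one character
    intro k hk
    rw [List.mem_range] at hk
    rw [PySem.Int.mod_eq_emod_of_pos (by norm_num),
        PySem.Int.floordiv_eq_ediv_of_pos (a := ((n : Int))) (by norm_num),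
        PySem.Int.floordiv_eq_ediv_of_pos (a := ((k : Int))) (by norm_num)]
    by_cases hk2 : k % 2 = 0
    · rw [if_pos (by simp [beq_iff_eq]; omega : ((k : Int) % 2 == 0) = true), if_pos hk2]
      have harg : ((n : Int)) / 2 + ((k : Int)) / 2 = (((n / 2 + k / 2 : Nat)) : Int) := by omega
      rw [harg, PySem.Str.pyGet?_natCast, ← hcs]
      have hidx : n / 2 + k / 2 < n := by omega
      rw [List.getElem?_eq_getElem (by omega)]
      have : s.getD (k / 2) 'A' = cs[n / 2 + k / 2]'(by omega) := by
        rw [hs, List.getD_eq_getElem _ _ (by simp [hn]; omega), List.getElem_drop]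
      rw [this]
      rfl
    · rw [if_neg (by simp [beq_iff_eq]; omega : ¬ ((k : Int) % 2 == 0) = true), if_neg hk2]
      have harg : ((k : Int)) / 2 = (((k / 2 : Nat)) : Int) := by omega
      rw [harg, PySem.Str.pyGet?_natCast, ← hcs]
      have hidx : k / 2 < n := by omega
      rw [List.getElem?_eq_getElem (by omega)]
      have : f.getD (k / 2) 'A' = cs[k / 2]'(by omega) := by
        have hlt : k / 2 < n / 2 := by omega
        rw [hf, List.getD_eq_getElem _ _ (by simp [hn]; omega), List.getElem_take]
      rw [this]
      rfl
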